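-- pv_equiv track=rewrite | github.com/guillainbisimwa/competitive-programming | A_The_Literary_Duel.py | final_scores
-- ===== SOURCE A (Python) =====
-- def final_scores(n, powers):
--     hermione_score = 0
--     harry_score = 0
--     left = 0
--     right = n - 1
--
--     while left <= right:
--         if powers[left] > powers[right]:
--             hermione_score += powers[left]
--             left += 1
--         else:
--             hermione_score += powers[right]
--             right -= 1
--
--         if left <= right:
--             if powers[left] > powers[right]:
--                 harry_score += powers[left]
--                 left += 1
--             else:
--                 harry_score += powers[right]
--                 right -= 1
--
--     return hermione_score, harry_score
-- ===== SOURCE B (Python) =====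
-- def final_scores(n, powers):
--     # Phase 1: determine the consumption order of spells (larger end first, right on ties).
--     lst = list(powers[:n]) if n > 0 else []
--     picks = []
--     while lst:
--         if lst[0] > lst[-1]:
--             picks.append(lst.pop(0))
--         else:
--             picks.append(lst.pop())
--     # Phase 2: tally by turn parity (Hermione takes even turns, Harry odd turns).
--     hermione_score = sum(v for i, v in enumerate(picks) if i % 2 == 0)
--     harry_score = sum(v for i, v in enumerate(picks) if i % 2 == 1)
--     return hermione_score, harry_score
-- ===== Notes on version B (the rewrite author's own statement) =====
-- stated objective: alternative
-- what changed: B separates the computation into two passes: it first builds the list of picked values in consumption order by repeatedly popping the larger end (right end on ties) of a working list, then tallies Hermione's and Harry's scores as the sums of picks at even and odd turn indices, instead of A's inline two-pointer loop that adds into the two accumulators as it goes.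
import Mathlib
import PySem

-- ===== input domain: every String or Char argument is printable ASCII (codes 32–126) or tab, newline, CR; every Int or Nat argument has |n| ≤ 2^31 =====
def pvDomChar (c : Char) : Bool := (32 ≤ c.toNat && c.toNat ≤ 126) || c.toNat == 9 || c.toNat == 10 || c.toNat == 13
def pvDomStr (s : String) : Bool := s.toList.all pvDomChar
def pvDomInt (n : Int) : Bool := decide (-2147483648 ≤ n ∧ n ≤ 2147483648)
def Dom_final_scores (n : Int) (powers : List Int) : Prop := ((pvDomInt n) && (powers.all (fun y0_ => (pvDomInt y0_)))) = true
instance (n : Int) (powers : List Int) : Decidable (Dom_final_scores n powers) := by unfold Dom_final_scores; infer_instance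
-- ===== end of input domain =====

-- B separates the work into two passes (build the pick order, then tally by turn parity)
-- instead of A's inline two-pointer accumulation; same cost, 'alternative' objective.

-- ===== PORT A =====
-- A's while-loop: two picks per iteration (Hermione then, if any remain, Harry).
-- The Nat fuel only makes the loop total; the top call passes enough for every iteration.
def pvALoop (p : List Int) : Nat → Int → Int → Int → Int → Int × Int
  | 0, _, _, hs, ha => (hs, ha)
  | f + 1, l, r, hs, ha =>
    if l ≤ r then
      if PySem.List.pyGetD p l 0 > PySem.List.pyGetD p r 0 then
        if l + 1 ≤ r then
          if PySem.List.pyGetD p (l+1) 0 > PySem.List.pyGetD p r 0 then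
            pvALoop p f (l+2) r (hs + PySem.List.pyGetD p l 0) (ha + PySem.List.pyGetD p (l+1) 0)
          else
            pvALoop p f (l+1) (r-1) (hs + PySem.List.pyGetD p l 0) (ha + PySem.List.pyGetD p r 0)
        else (hs + PySem.List.pyGetD p l 0, ha)
      else
        if l ≤ r - 1 then
          if PySem.List.pyGetD p l 0 > PySem.List.pyGetD p (r-1) 0 then
            pvALoop p f (l+1) (r-1) (hs + PySem.List.pyGetD p r 0) (ha + PySem.List.pyGetD p l 0)
          else
            pvALoop p f l (r-2) (hs + PySem.List.pyGetD p r 0) (ha + PySem.List.pyGetD p (r-1) 0)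
        else (hs + PySem.List.pyGetD p r 0, ha)
    else (hs, ha)

def final_scores (n : Int) (powers : List Int) : Int × Int :=
  pvALoop powers n.toNat 0 (n - 1) 0 0

-- ===== PORT B =====
-- B phase 1: pop the larger end (right end on ties) of the working list until empty.
-- One element is consumed per step, so the list's length is exactly enough fuel.
def pvPickOrderFuel : Nat → List Int → List Int
  | 0, _ => []
  | _, [] => []
  | f + 1, x :: xs =>
    if x > (x :: xs).getLast (List.cons_ne_nil x xs) then
      x :: pvPickOrderFuel f xs
    else
      (x :: xs).getLast (List.cons_ne_nil x xs) :: pvPickOrderFuel f (x :: xs).dropLast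

def pvPickOrder (l : List Int) : List Int := pvPickOrderFuel l.length l

-- B phase 2: sum the picks at even turns (Hermione) and odd turns (Harry).
def final_scores_alt (n : Int) (powers : List Int) : Int × Int :=
  let lst := if n > 0 then PySem.List.slice powers none (some n) else []
  let picks := pvPickOrder lst
  ((((PySem.List.enumerate picks 0).filter (fun q => PySem.Int.mod q.1 2 == 0)).map (fun q => q.2)).sum,
   (((PySem.List.enumerate picks 0).filter (fun q => PySem.Int.mod q.1 2 == 1)).map (fun q => q.2)).sum)

-- ===== PRECONDITION & SPEC =====
-- Pre_ excludes exactly the inputs where A raises IndexError: n larger than len(powers)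
-- (A then reads powers[n-1] out of range).
def Pre_final_scores (n : Int) (powers : List Int) : Prop :=
  n ≤ (powers.length : Int) ∨ n ≤ 0
instance (n : Int) (powers : List Int) : Decidable (Pre_final_scores n powers) := by
  unfold Pre_final_scores; infer_instance

def pvWitness_final_scores : Int × List Int := (3, [1, 5, 2])

def Spec_final_scores (n : Int) (powers : List Int) (out : Int × Int) : Prop := out = final_scores_alt n powers
instance (n : Int) (powers : List Int) (out : Int × Int) : Decidable (Spec_final_scores n powers out) := by unfold Spec_final_scores; infer_instance

-- ===== CLAIM (what is proved, stated in full; the proofs are below) =====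
def Claim_equal_final_scores : Prop := ∀ (n : Int) (powers : List Int), Dom_final_scores n powers → Pre_final_scores n powers → Spec_final_scores n powers (final_scores n powers)

-- ===== LEMMAS AND PROOFS =====

-- the segment powers[l..r] that A's pointers still cover
def pvSeg (p : List Int) (l r : Int) : List Int :=
  (p.drop l.toNat).take (r + 1 - l).toNat

-- (even-turn sum, odd-turn sum) of a pick list
def pvAltSum : List Int → Int × Int
  | [] => (0, 0)
  | x :: xs => (x + (pvAltSum xs).2, (pvAltSum xs).1)

lemma pvSeg_nil (p : List Int) {l r : Int} (h : r < l) : pvSeg p l r = [] := by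
  unfold pvSeg
  have h0 : (r + 1 - l).toNat = 0 := by omega
  simp [h0]

lemma pvSeg_cons (p : List Int) {l r : Int} (h0 : 0 ≤ l) (hlr : l ≤ r)
    (hr : r < (p.length : Int)) :
    pvSeg p l r = p[l.toNat]'(by omega) :: pvSeg p (l + 1) r := by
  unfold pvSeg
  have hl : l.toNat < p.length := by omega
  rw [List.drop_eq_getElem_cons hl]
  obtain ⟨k, hk⟩ : ∃ k, (r + 1 - l).toNat = k + 1 := ⟨(r - l).toNat, by omega⟩
  rw [hk, List.take_succ_cons]
  have h1 : (l + 1).toNat = l.toNat + 1 := by omega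
  have h2 : (r + 1 - (l + 1)).toNat = k := by omega
  rw [h1, h2]

lemma pvSeg_concat (p : List Int) {l r : Int} (h0 : 0 ≤ l) (hlr : l ≤ r)
    (hr : r < (p.length : Int)) :
    pvSeg p l r = pvSeg p l (r - 1) ++ [p[r.toNat]'(by omega)] := by
  unfold pvSeg
  have hm : (r + 1 - l).toNat = (r - l).toNat + 1 := by omega
  rw [hm, List.take_add_one]
  have hidx : (p.drop l.toNat)[(r - l).toNat]? = some (p[r.toNat]'(by omega)) := by
    rw [List.getElem?_drop, show l.toNat + (r - l).toNat = r.toNat from by omega,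
      List.getElem?_eq_getElem (by omega)]
  rw [hidx]
  have h2 : (r - 1 + 1 - l).toNat = (r - l).toNat := by omega
  rw [h2]
  simp

lemma pvPickOrder_nil : pvPickOrder [] = [] := rfl

lemma pvPickOrder_cons (x : Int) (xs : List Int) :
    pvPickOrder (x :: xs) =
      if x > (x :: xs).getLast (List.cons_ne_nil x xs) then
        x :: pvPickOrder xs
      else
        (x :: xs).getLast (List.cons_ne_nil x xs) :: pvPickOrder (x :: xs).dropLast := by
  show pvPickOrderFuel (xs.length + 1) (x :: xs) = _
  rw [pvPickOrderFuel]
  unfold pvPickOrder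
  rw [show ((x :: xs).dropLast).length = xs.length by simp]

lemma pvPickOrder_singleton (x : Int) : pvPickOrder [x] = [x] := by
  rw [pvPickOrder_cons]
  simp [pvPickOrder_nil]

lemma pvPickOrder_concat (x : Int) (mid : List Int) (b : Int) :
    pvPickOrder (x :: (mid ++ [b])) =
      if x > b then x :: pvPickOrder (mid ++ [b]) else b :: pvPickOrder (x :: mid) := by
  rw [pvPickOrder_cons]
  have hlast : (x :: (mid ++ [b])).getLast (List.cons_ne_nil _ _) = b := by
    rw [List.getLast_cons (by simp)]
    exact List.getLast_concat
  have hdrop : (x :: (mid ++ [b])).dropLast = x :: mid := by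
    rw [show x :: (mid ++ [b]) = (x :: mid) ++ [b] by simp]
    exact List.dropLast_concat
  rw [hlast, hdrop]

lemma pvPickOrder_seg (p : List Int) {l r : Int} (h0 : 0 ≤ l) (hlr : l ≤ r)
    (hr : r < (p.length : Int)) :
    pvPickOrder (pvSeg p l r) =
      if p[l.toNat]'(by omega) > p[r.toNat]'(by omega) then
        p[l.toNat]'(by omega) :: pvPickOrder (pvSeg p (l + 1) r)
      else
        p[r.toNat]'(by omega) :: pvPickOrder (pvSeg p l (r - 1)) := by
  rcases eq_or_lt_of_le hlr with heq | hlt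
  · subst heq
    rw [pvSeg_cons p h0 (le_refl l) hr, pvSeg_nil p (by omega), pvPickOrder_singleton]
    rw [if_neg (lt_irrefl _)]
    rw [pvSeg_nil p (by omega), pvPickOrder_nil]
  · have hcons : pvSeg p l r = p[l.toNat]'(by omega) :: pvSeg p (l + 1) r :=
      pvSeg_cons p h0 hlr hr
    have hconc : pvSeg p (l + 1) r = pvSeg p (l + 1) (r - 1) ++ [p[r.toNat]'(by omega)] :=
      pvSeg_concat p (by omega) (by omega) hr
    have hcons' : pvSeg p l (r - 1) = p[l.toNat]'(by omega) :: pvSeg p (l + 1) (r - 1) :=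
      pvSeg_cons p h0 (by omega) (by omega)
    rw [hcons, hconc, pvPickOrder_concat, ← hconc, ← hcons']

lemma pvEnumSum (xs : List Int) : ∀ (s : Int), 0 ≤ s →
    ((((PySem.List.enumerate xs s).filter (fun q => PySem.Int.mod q.1 2 == 0)).map (fun q => q.2)).sum
      = (if s % 2 = 0 then (pvAltSum xs).1 else (pvAltSum xs).2))
    ∧ ((((PySem.List.enumerate xs s).filter (fun q => PySem.Int.mod q.1 2 == 1)).map (fun q => q.2)).sum
      = (if s % 2 = 0 then (pvAltSum xs).2 else (pvAltSum xs).1)) := by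
  induction xs with
  | nil =>
    intro s hs
    simp [PySem.List.enumerate, pvAltSum]
  | cons x xs ih =>
    intro s hs
    rw [PySem.List.enumerate_cons]
    have hmodAll : ∀ a : Int, PySem.Int.mod a 2 = a % 2 := fun a =>
      PySem.Int.mod_eq_emod_of_pos (by omega)
    obtain ⟨ih0, ih1⟩ := ih (s + 1) (by omega)
    simp only [hmodAll] at ih0 ih1 ⊢
    by_cases hp : s % 2 = 0
    · have hp1 : ¬ ((s + 1) % 2 = 0) := by omega
      rw [if_neg hp1] at ih0 ih1
      constructor
      · simp [hp, pvAltSum, ih0]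
      · simp [hp, pvAltSum, ih1]
    · have hp' : s % 2 = 1 := by omega
      have hp1 : (s + 1) % 2 = 0 := by omega
      rw [if_pos hp1] at ih0 ih1
      constructor
      · simp [hp', pvAltSum, ih0]
      · simp [hp', pvAltSum, ih1]

lemma pvALoop_eq (p : List Int) (k : Nat) :
    ∀ (l r hs ha : Int), (r + 1 - l).toNat ≤ k → 0 ≤ l → r < (p.length : Int) →
      pvALoop p k l r hs ha =
        (hs + (pvAltSum (pvPickOrder (pvSeg p l r))).1,
         ha + (pvAltSum (pvPickOrder (pvSeg p l r))).2) := by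
  induction k with
  | zero =>
    intro l r hs ha hk h0 hr
    rw [show pvALoop p 0 l r hs ha = (hs, ha) from rfl, pvSeg_nil p (by omega)]
    simp [pvPickOrder, pvPickOrderFuel, pvAltSum]
  | succ k ih =>
    intro l r hs ha hk h0 hr
    by_cases hlr : l ≤ r
    · have hgl : PySem.List.pyGetD p l 0 = p[l.toNat]'(by omega) :=
        PySem.List.pyGetD_eq_getElem p 0 h0 (by omega)
      have hgr : PySem.List.pyGetD p r 0 = p[r.toNat]'(by omega) :=
        PySem.List.pyGetD_eq_getElem p 0 (by omega) (by omega)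
      rw [pvALoop, if_pos hlr, hgl, hgr, pvPickOrder_seg p h0 hlr hr]
      by_cases hcmp : p[l.toNat]'(by omega) > p[r.toNat]'(by omega)
      · rw [if_pos hcmp, if_pos hcmp]
        by_cases h2 : l + 1 ≤ r
        · have hgl1 : PySem.List.pyGetD p (l+1) 0 = p[(l+1).toNat]'(by omega) :=
            PySem.List.pyGetD_eq_getElem p 0 (by omega) (by omega)
          rw [if_pos h2, hgl1, pvPickOrder_seg p (by omega) h2 hr]
          by_cases hcmp2 : p[(l+1).toNat]'(by omega) > p[r.toNat]'(by omega)
          · rw [if_pos hcmp2, if_pos hcmp2]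
            rw [show l + 1 + 1 = l + 2 from by ring, ih (l+2) r _ _ (by omega) (by omega) hr]
            simp [pvAltSum]; constructor <;> ring
          · rw [if_neg hcmp2, if_neg hcmp2]
            rw [ih (l+1) (r-1) _ _ (by omega) (by omega) (by omega)]
            simp [pvAltSum]; constructor <;> ring
        · rw [if_neg h2]
          simp only [show r.toNat = l.toNat from by omega] at hcmp
          exact absurd hcmp (lt_irrefl _)
      · rw [if_neg hcmp, if_neg hcmp]
        by_cases h2 : l ≤ r - 1
        · have hgr1 : PySem.List.pyGetD p (r-1) 0 = p[(r-1).toNat]'(by omega) :=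
            PySem.List.pyGetD_eq_getElem p 0 (by omega) (by omega)
          rw [if_pos h2, hgr1, pvPickOrder_seg p h0 h2 (by omega)]
          by_cases hcmp2 : p[l.toNat]'(by omega) > p[(r-1).toNat]'(by omega)
          · rw [if_pos hcmp2, if_pos hcmp2]
            rw [ih (l+1) (r-1) _ _ (by omega) (by omega) (by omega)]
            simp [pvAltSum]; constructor <;> ring
          · rw [if_neg hcmp2, if_neg hcmp2]
            rw [show r - 1 - 1 = r - 2 from by ring, ih l (r-2) _ _ (by omega) h0 (by omega)]
            simp [pvAltSum]; constructor <;> ring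
        · rw [if_neg h2]
          rw [pvSeg_nil p (by omega)]
          simp [pvPickOrder, pvPickOrderFuel, pvAltSum]
    · rw [pvALoop, if_neg hlr, pvSeg_nil p (by omega)]
      simp [pvPickOrder, pvPickOrderFuel, pvAltSum]

-- ===== VERDICT (by name: the statement is the Claim_ definition above) =====
theorem final_scores_spec : Claim_equal_final_scores := by
  intro n powers _hdom hpre
  unfold Spec_final_scores
  show final_scores n powers = final_scores_alt n powers
  by_cases hn : 0 < n
  · have hlen : n ≤ (powers.length : Int) := by
      rcases hpre with h | h
      · exact h
      · omega
    unfold final_scores final_scores_alt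
    simp only [if_pos hn]
    rw [PySem.List.slice_to powers hn.le]
    have hseg : pvSeg powers 0 (n - 1) = powers.take n.toNat := by
      unfold pvSeg
      have h1 : (0 : Int).toNat = 0 := rfl
      have h2 : (n - 1 + 1 - 0).toNat = n.toNat := by omega
      rw [h1, h2, List.drop_zero]
    rw [pvALoop_eq powers n.toNat 0 (n - 1) 0 0 (by omega) (by omega) (by omega), hseg]
    obtain ⟨h0, h1⟩ := pvEnumSum (pvPickOrder (powers.take n.toNat)) 0 (le_refl 0)
    rw [h0, h1]
    simp
  · unfold final_scores final_scores_alt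
    rw [show n.toNat = 0 from by omega]
    simp only [if_neg hn]
    simp [pvALoop, pvPickOrder, pvPickOrderFuel]
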